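-- pv_equiv track=rewrite | github.com/carnival77/Algorithm_Practice | Programmers/Python/Level4/Kakao/Greedy/무지의 먹방 라이브.py | solution
-- ===== SOURCE A (Python) =====
-- import heapq
--
-- def solution(food_times, k):
--     if sum(food_times) <= k:
--         return -1
--
--     q = []
--
--     #
--     for i in range(len(food_times)):
--         heapq.heappush(q, (food_times[i], i + 1))
--
--     sum_time = 0
--     pre_time = 0
--
--     food_cnt = len(food_times)
--
--     while sum_time + (q[0][0] - pre_time) * food_cnt <= k:
--         this_food_time = heapq.heappop(q)[0]
--         sum_time += (this_food_time - pre_time) * food_cnt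
--         food_cnt -= 1
--         pre_time = this_food_time
--
--     result = sorted(q, key=lambda x: x[1])
--     return result[(k - sum_time) % food_cnt][1]
-- ===== SOURCE B (Python) =====
-- def solution(food_times, k):
--     total = sum(food_times)
--     if total <= k:
--         return -1
--
--     # Binary search the eating threshold instead of simulating the pops:
--     # full(j) = time needed to eat every food down to level vals[j]
--     # (= sum(min(f, vals[j]) for f in food_times)), nondecreasing in j.
--     n = len(food_times)
--     vals = sorted(food_times)
--     prefix = [0]
--     for v in vals:
--         prefix.append(prefix[-1] + v)
--
--     def full(j):
--         return prefix[j + 1] + vals[j] * (n - 1 - j)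
--
--     lo, hi = 0, n
--     while lo < hi:
--         mid = (lo + hi) // 2
--         if full(mid) <= k:
--             lo = mid + 1
--         else:
--             hi = mid
--
--     if lo == 0:
--         sum_time = 0
--         rem = list(range(1, n + 1))
--     else:
--         threshold = vals[lo - 1]
--         sum_time = full(lo - 1)
--         rem = [i + 1 for i, f in enumerate(food_times) if f > threshold]
--     return rem[(k - sum_time) % len(rem)]
-- ===== Notes on version B (the rewrite author's own statement) =====
-- stated objective: alternative
-- what changed: Instead of simulating the eating process (heap pops with a running sum), B binary-searches the eating threshold: with prefix sums over the sorted values it evaluates full(j) = time to eat everything down to level vals[j] in O(1), bisects for the largest consumed level, and builds the surviving foods by one filter pass.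
import Mathlib
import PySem

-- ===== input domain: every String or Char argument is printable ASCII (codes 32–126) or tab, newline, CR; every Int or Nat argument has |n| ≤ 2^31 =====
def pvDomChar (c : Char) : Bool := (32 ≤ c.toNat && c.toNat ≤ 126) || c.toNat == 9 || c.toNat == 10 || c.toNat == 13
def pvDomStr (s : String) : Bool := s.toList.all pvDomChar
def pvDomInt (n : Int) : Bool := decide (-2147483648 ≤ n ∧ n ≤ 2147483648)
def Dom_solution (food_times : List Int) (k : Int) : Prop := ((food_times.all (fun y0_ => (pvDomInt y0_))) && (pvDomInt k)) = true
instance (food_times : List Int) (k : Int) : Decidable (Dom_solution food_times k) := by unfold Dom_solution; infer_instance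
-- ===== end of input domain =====

-- B replaces the heap simulation of the eating process by a binary search for the
-- eating threshold over prefix sums of the sorted values, plus one filter pass
-- for the surviving foods: an alternative algorithm of the same O(n log n) cost.

-- ===== PORT A =====
-- Python tuple comparison (Int × Int), lexicographic '<' as heapq uses it: exact.
def pvLt (a b : Int × Int) : Bool := a.1 < b.1 || (a.1 == b.1 && a.2 < b.2)

-- heap[i] ; every access in heapq's code is in range, the default is never returned on reachable paths
def pvGet (h : List (Int × Int)) (i : Nat) : Int × Int := h.getD i (0, 0)

-- hand port of heapq._siftdown (PySem has no heapq), step for step;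
-- the fuel argument only makes the recursion structural (pos strictly decreases,
-- so fuel = pos + 1 always suffices and the 0 branch is never reached)
def pvSiftdownGo : Nat → List (Int × Int) → Nat → Nat → (Int × Int) → List (Int × Int)
  | 0, h, _, pos, newitem => h.set pos newitem
  | fuel + 1, h, startpos, pos, newitem =>
    if startpos < pos then
      let parentpos := (pos - 1) / 2
      let parent := pvGet h parentpos
      if pvLt newitem parent then
        pvSiftdownGo fuel (h.set pos parent) startpos parentpos newitem
      else h.set pos newitem
    else h.set pos newitem

def pvSiftdown (h : List (Int × Int)) (startpos pos : Nat) (newitem : Int × Int) : List (Int × Int) :=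
  pvSiftdownGo (pos + 1) h startpos pos newitem

-- hand port of heapq._siftup, step for step; fuel = h.length + 1 suffices
-- (the cursor moves strictly down the tree)
def pvSiftupGo : Nat → List (Int × Int) → Nat → Nat → (Int × Int) → List (Int × Int)
  | 0, h, startpos, pos, newitem => pvSiftdown (h.set pos newitem) startpos pos newitem
  | fuel + 1, h, startpos, pos, newitem =>
    if 2 * pos + 1 < h.length then
      let childpos := if 2 * pos + 2 < h.length ∧ pvLt (pvGet h (2 * pos + 1)) (pvGet h (2 * pos + 2)) = false
                      then 2 * pos + 2 else 2 * pos + 1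
      pvSiftupGo fuel (h.set pos (pvGet h childpos)) startpos childpos newitem
    else pvSiftdown (h.set pos newitem) startpos pos newitem

def pvSiftup (h : List (Int × Int)) (startpos pos : Nat) (newitem : Int × Int) : List (Int × Int) :=
  pvSiftupGo (h.length + 1) h startpos pos newitem

def pvHeappush (h : List (Int × Int)) (item : Int × Int) : List (Int × Int) :=
  pvSiftdown (h ++ [item]) 0 h.length item

-- heapq.heappop; caller guarantees h ≠ [] (Python raises otherwise)
def pvHeappop (h : List (Int × Int)) : (Int × Int) × List (Int × Int) :=
  let lastelt := pvGet h (h.length - 1)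
  let rest := h.take (h.length - 1)
  if 0 < rest.length then
    (pvGet rest 0, pvSiftup (rest.set 0 lastelt) 0 0 lastelt)
  else (lastelt, [])

-- A's while loop; the q = [] branch is where Python raises IndexError (excluded by Pre_);
-- fuel = q.length + 1 suffices (each pop shortens the heap)
def pvLoopA : Nat → List (Int × Int) → Int → Int → Int → Int → Int
  | 0, _, _, _, _, _ => 0
  | fuel + 1, q, sum_time, pre_time, food_cnt, k =>
    if q ≠ [] then
      if sum_time + ((pvGet q 0).1 - pre_time) * food_cnt ≤ k then
        let pr := pvHeappop q
        pvLoopA fuel pr.2 (sum_time + (pr.1.1 - pre_time) * food_cnt) pr.1.1 (food_cnt - 1) k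
      else
        let result := PySem.List.sorted q (fun x => x.2) false
        ((PySem.List.pyGet? result (PySem.Int.mod (k - sum_time) food_cnt)).getD (0, 0)).2
    else 0

def solution (food_times : List Int) (k : Int) : Int :=
  if food_times.sum ≤ k then -1
  else
    let q := (PySem.List.pyRange 0 (food_times.length : Int) 1).foldl
      (fun q i => pvHeappush q (PySem.List.pyGetD food_times i 0, i + 1)) []
    pvLoopA (q.length + 1) q 0 0 (food_times.length : Int) k

-- ===== PORT B =====
-- full(j) of Source B: time needed to eat every food down to level vals[j]
def pvFullAt (prefix_ vals : List Int) (n j : Int) : Int :=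
  PySem.List.pyGetD prefix_ (j + 1) 0 + PySem.List.pyGetD vals j 0 * (n - 1 - j)

-- Source B's hand-written binary-search while loop; fuel only makes it structural
-- (hi - lo shrinks every iteration, so vals.length + 1 at the call site suffices)
def pvBS : Nat → List Int → List Int → Int → Int → Int → Int → Int
  | 0, _, _, _, _, lo, _ => lo
  | fuel + 1, prefix_, vals, n, k, lo, hi =>
    if lo < hi then
      let mid := PySem.Int.floordiv (lo + hi) 2
      if pvFullAt prefix_ vals n mid ≤ k then pvBS fuel prefix_ vals n k (mid + 1) hi
      else pvBS fuel prefix_ vals n k lo mid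
    else lo

def solution_alt (food_times : List Int) (k : Int) : Int :=
  if food_times.sum ≤ k then -1
  else
    let n : Int := (food_times.length : Int)
    let vals := PySem.List.sorted food_times (fun x => x) false
    let prefix_ := vals.foldl (fun acc v => acc ++ [PySem.List.pyGetD acc (-1) 0 + v]) [0]
    let lo := pvBS (vals.length + 1) prefix_ vals n k 0 n
    let st_rem : Int × List Int :=
      if lo = 0 then (0, PySem.List.pyRange 1 (n + 1) 1)
      else (pvFullAt prefix_ vals n (lo - 1),
            ((PySem.List.enumerate food_times 0).filter
              (fun p => decide (PySem.List.pyGetD vals (lo - 1) 0 < p.2))).map (fun p => p.1 + 1))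
    (PySem.List.pyGet? st_rem.2 (PySem.Int.mod (k - st_rem.1) (st_rem.2.length : Int))).getD 0

-- ===== PRECONDITION & SPEC =====
-- Pre_ excludes only empty food_times with k < 0, where Python A raises IndexError on q[0] (B raises too).
def Pre_solution (food_times : List Int) (k : Int) : Prop := food_times = [] → 0 ≤ k
instance (food_times : List Int) (k : Int) : Decidable (Pre_solution food_times k) := by
  unfold Pre_solution; infer_instance
def pvWitness_solution : List Int × Int := ([3, 1, 2], 5)

def Spec_solution (food_times : List Int) (k : Int) (out : Int) : Prop := out = solution_alt food_times k
instance (food_times : List Int) (k : Int) (out : Int) : Decidable (Spec_solution food_times k out) := by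
  unfold Spec_solution; infer_instance

-- ===== CLAIM (what is proved, stated in full; the proofs are below) =====
def Claim_equal_solution : Prop := ∀ (food_times : List Int) (k : Int), Dom_solution food_times k → Pre_solution food_times k → Spec_solution food_times k (solution food_times k)

-- ===== LEMMAS AND PROOFS =====

-- basic facts about the lexicographic comparison
theorem pvLt_irrefl (a : Int × Int) : pvLt a a = false := by
  simp [pvLt]

theorem pvLt_asymm {a b : Int × Int} (h : pvLt a b = true) : pvLt b a = false := by
  simp [pvLt] at *; omega

theorem pvLe_trans {a b c : Int × Int} (h1 : pvLt b a = false) (h2 : pvLt c b = false) :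
    pvLt c a = false := by
  simp [pvLt] at *; omega

theorem pvLe_antisymm {a b : Int × Int} (h1 : pvLt b a = false) (h2 : pvLt a b = false) :
    a = b := by
  obtain ⟨a1, a2⟩ := a; obtain ⟨b1, b2⟩ := b
  simp [pvLt] at *; omega

theorem pvLt_ff_of_ff_tt {x p i : Int × Int} (h1 : pvLt x p = false) (h2 : pvLt i p = true) :
    pvLt x i = false := by
  simp [pvLt] at *; omega

-- pvGet on set / append / take
theorem pvGet_set_self {l : List (Int × Int)} {i : Nat} (hi : i < l.length) (a : Int × Int) :
    pvGet (l.set i a) i = a := by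
  simp [pvGet, List.getD_eq_getElem?_getD, hi]

theorem pvGet_set_ne {l : List (Int × Int)} {i j : Nat} (hij : i ≠ j) (a : Int × Int) :
    pvGet (l.set i a) j = pvGet l j := by
  simp [pvGet, List.getD_eq_getElem?_getD, hij]

theorem pvGet_eq_getElem {l : List (Int × Int)} {i : Nat} (hi : i < l.length) :
    pvGet l i = l[i] := List.getD_eq_getElem l (0, 0) hi

theorem pvGet_append_lt {l : List (Int × Int)} {i : Nat} (x : Int × Int) (hi : i < l.length) :
    pvGet (l ++ [x]) i = pvGet l i := by
  rw [pvGet_eq_getElem (by simp; omega), pvGet_eq_getElem hi, List.getElem_append_left hi]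

theorem pvGet_take {l : List (Int × Int)} {m i : Nat} (hi : i < m) :
    pvGet (l.take m) i = pvGet l i := by
  simp [pvGet, List.getD_eq_getElem?_getD, hi]

-- the heap invariant: no child is smaller than its parent
def HeapInv (h : List (Int × Int)) : Prop :=
  ∀ i j, j < h.length → (j = 2 * i + 1 ∨ j = 2 * i + 2) →
    pvLt (pvGet h j) (pvGet h i) = false

-- multiset bookkeeping for List.set
theorem mset_set : ∀ (l : List (Int × Int)) (i : Nat), i < l.length → ∀ (a : Int × Int),
    (pvGet l i) ::ₘ (↑(l.set i a) : Multiset (Int × Int)) = a ::ₘ (↑l : Multiset (Int × Int))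
  | x :: xs, 0, _, a => by
      simp [pvGet, ← Multiset.cons_coe, Multiset.cons_swap]
  | x :: xs, i + 1, hi, a => by
      have ih := mset_set xs i (by simpa using hi) a
      simp only [List.set_cons_succ, ← Multiset.cons_coe]
      have : pvGet (x :: xs) (i + 1) = pvGet xs i := by simp [pvGet]
      rw [this, Multiset.cons_swap, ih, Multiset.cons_swap]

theorem mset_two_set (h : List (Int × Int)) (i j : Nat) (hi : i < h.length)
    (hj : j < h.length) (hij : i ≠ j) (item : Int × Int) :
    (↑((h.set i (pvGet h j)).set j item) : Multiset (Int × Int)) = ↑(h.set i item) := by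
  set g := h.set i (pvGet h j) with hg
  have e1 : (pvGet g j) ::ₘ (↑(g.set j item) : Multiset (Int × Int)) = item ::ₘ ↑g :=
    mset_set g j (by simp [hg, hj]) item
  have e2 : (pvGet h i) ::ₘ (↑g : Multiset (Int × Int)) = (pvGet h j) ::ₘ ↑h :=
    mset_set h i hi (pvGet h j)
  have e3 : (pvGet h i) ::ₘ (↑(h.set i item) : Multiset (Int × Int)) = item ::ₘ ↑h :=
    mset_set h i hi item
  have egj : pvGet g j = pvGet h j := pvGet_set_ne hij _
  rw [egj] at e1
  have : (pvGet h i) ::ₘ (pvGet h j) ::ₘ (↑(g.set j item) : Multiset (Int × Int))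
       = (pvGet h i) ::ₘ (pvGet h j) ::ₘ ↑(h.set i item) := by
    calc (pvGet h i) ::ₘ (pvGet h j) ::ₘ (↑(g.set j item) : Multiset (Int × Int))
        = (pvGet h i) ::ₘ item ::ₘ ↑g := by rw [e1]
      _ = item ::ₘ ((pvGet h i) ::ₘ ↑g) := by rw [Multiset.cons_swap]
      _ = item ::ₘ (pvGet h j) ::ₘ ↑h := by rw [e2]
      _ = (pvGet h j) ::ₘ (item ::ₘ ↑h) := by rw [Multiset.cons_swap]
      _ = (pvGet h j) ::ₘ (pvGet h i) ::ₘ ↑(h.set i item) := by rw [← e3]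
      _ = (pvGet h i) ::ₘ (pvGet h j) ::ₘ ↑(h.set i item) := by rw [Multiset.cons_swap]
  exact (Multiset.cons_inj_right _).mp ((Multiset.cons_inj_right _).mp this)

theorem pvSiftdownGo_spec : ∀ (fuel pos : Nat) (h : List (Int × Int)) (item : Int × Int),
    pos < fuel →
    pos < h.length →
    (∀ i j, j < h.length → (j = 2 * i + 1 ∨ j = 2 * i + 2) → i ≠ pos → j ≠ pos →
      pvLt (pvGet h j) (pvGet h i) = false) →
    (∀ j, j < h.length → (j = 2 * pos + 1 ∨ j = 2 * pos + 2) →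
      pvLt (pvGet h j) item = false) →
    (0 < pos → ∀ j, j < h.length → (j = 2 * pos + 1 ∨ j = 2 * pos + 2) →
      pvLt (pvGet h j) (pvGet h ((pos - 1) / 2)) = false) →
    HeapInv (pvSiftdownGo fuel h 0 pos item) ∧
      (↑(pvSiftdownGo fuel h 0 pos item) : Multiset (Int × Int)) = ↑(h.set pos item) := by
  intro fuel
  induction fuel with
  | zero => intro pos h item hfuel; omega
  | succ fuel IH =>
    intro pos h item hfuel hpos ha hb hc
    simp only [pvSiftdownGo]
    by_cases h0 : 0 < pos
    · rw [if_pos h0]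
      set pp := (pos - 1) / 2 with hpp
      have hpplt : pp < pos := by omega
      by_cases hcmp : pvLt item (pvGet h pp) = true
      · rw [if_pos hcmp]
        have hlen' : pp < (h.set pos (pvGet h pp)).length := by simp; omega
        have key := IH pp (h.set pos (pvGet h pp)) item (by omega) hlen'
          (by -- ha'
            intro i j hj hch hip hjp
            simp only [List.length_set] at hj
            have hij : i < j := by omega
            by_cases hipos : i = pos
            · subst hipos
              rw [pvGet_set_self hpos, pvGet_set_ne (by omega), hpp]
              exact hc h0 j hj (by omega)
            · have hjpos : j ≠ pos := by
                intro hjj; subst hjj; omega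
              rw [pvGet_set_ne (by omega), pvGet_set_ne (by omega)]
              exact ha i j hj hch hipos hjpos)
          (by -- hb'
            intro j hj hch
            simp only [List.length_set] at hj
            by_cases hjpos : j = pos
            · subst hjpos
              rw [pvGet_set_self hpos]
              exact pvLt_asymm hcmp
            · rw [pvGet_set_ne (by omega)]
              have h1 : pvLt (pvGet h j) (pvGet h pp) = false :=
                ha pp j hj (by omega) (by omega) hjpos
              exact pvLt_ff_of_ff_tt h1 hcmp)
          (by -- hc'
            intro hpp0 j hj hch
            simp only [List.length_set] at hj
            set gp := (pp - 1) / 2 with hgp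
            have hgplt : gp < pp := by omega
            rw [pvGet_set_ne (show pos ≠ gp by omega)]
            have hpair : pvLt (pvGet h pp) (pvGet h gp) = false :=
              ha gp pp (by omega) (by omega) (by omega) (by omega)
            by_cases hjpos : j = pos
            · subst hjpos
              rw [pvGet_set_self hpos]
              exact hpair
            · rw [pvGet_set_ne (by omega)]
              have h2 : pvLt (pvGet h j) (pvGet h pp) = false :=
                ha pp j hj (by omega) (by omega) hjpos
              exact pvLe_trans hpair h2)
        refine ⟨key.1, ?_⟩
        rw [key.2]
        exact mset_two_set h pos pp hpos (by omega) (by omega) item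
      · rw [if_neg hcmp]
        constructor
        · intro i j hj hch
          simp only [List.length_set] at hj
          by_cases hipos : i = pos
          · subst hipos
            rw [pvGet_set_self hpos, pvGet_set_ne (by omega)]
            exact hb j hj hch
          · by_cases hjpos : j = pos
            · subst hjpos
              have hieq : i = pp := by omega
              subst hieq
              rw [pvGet_set_self hpos, pvGet_set_ne (by omega)]
              simpa using hcmp
            · rw [pvGet_set_ne (by omega), pvGet_set_ne (by omega)]
              exact ha i j hj hch hipos hjpos
        · rfl
    · rw [if_neg h0]
      have hpos0 : pos = 0 := by omega
      subst hpos0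
      constructor
      · intro i j hj hch
        simp only [List.length_set] at hj
        have hj0 : j ≠ 0 := by omega
        by_cases hi0 : i = 0
        · subst hi0
          rw [pvGet_set_self hpos, pvGet_set_ne (by omega)]
          exact hb j hj hch
        · rw [pvGet_set_ne (by omega), pvGet_set_ne (by omega)]
          exact ha i j hj hch hi0 hj0
      · rfl

theorem pvSiftdown_spec (pos : Nat) (h : List (Int × Int)) (item : Int × Int)
    (hpos : pos < h.length)
    (ha : ∀ i j, j < h.length → (j = 2 * i + 1 ∨ j = 2 * i + 2) → i ≠ pos → j ≠ pos →
      pvLt (pvGet h j) (pvGet h i) = false)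
    (hb : ∀ j, j < h.length → (j = 2 * pos + 1 ∨ j = 2 * pos + 2) →
      pvLt (pvGet h j) item = false)
    (hc : 0 < pos → ∀ j, j < h.length → (j = 2 * pos + 1 ∨ j = 2 * pos + 2) →
      pvLt (pvGet h j) (pvGet h ((pos - 1) / 2)) = false) :
    HeapInv (pvSiftdown h 0 pos item) ∧
      (↑(pvSiftdown h 0 pos item) : Multiset (Int × Int)) = ↑(h.set pos item) :=
  pvSiftdownGo_spec (pos + 1) pos h item (by omega) hpos ha hb hc

theorem pvSiftupGo_spec : ∀ (fuel : Nat) (h : List (Int × Int)) (pos : Nat) (item : Int × Int),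
    h.length - pos ≤ fuel →
    pos < h.length →
    (∀ i j, j < h.length → (j = 2 * i + 1 ∨ j = 2 * i + 2) → i ≠ pos → j ≠ pos →
      pvLt (pvGet h j) (pvGet h i) = false) →
    (0 < pos → ∀ j, j < h.length → (j = 2 * pos + 1 ∨ j = 2 * pos + 2) →
      pvLt (pvGet h j) (pvGet h ((pos - 1) / 2)) = false) →
    HeapInv (pvSiftupGo fuel h 0 pos item) ∧
      (↑(pvSiftupGo fuel h 0 pos item) : Multiset (Int × Int)) = ↑(h.set pos item) := by
  intro fuel
  induction fuel with
  | zero => intro h pos item hfuel hpos _ _; omega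
  | succ fuel IH =>
    intro h pos item hfuel hpos hA hC
    simp only [pvSiftupGo]
    by_cases hch : 2 * pos + 1 < h.length
    · rw [if_pos hch]
      set c := if 2 * pos + 2 < h.length ∧ pvLt (pvGet h (2 * pos + 1)) (pvGet h (2 * pos + 2)) = false
               then 2 * pos + 2 else 2 * pos + 1 with hcdef
      have hcchild : c = 2 * pos + 1 ∨ c = 2 * pos + 2 := by
        rw [hcdef]; split <;> simp
      have hclen : c < h.length := by
        rw [hcdef]; split <;> omega
      have hcpos : pos < c := by omega
      -- the chosen child is not larger than the sibling
      have hmin : ∀ d, (d = 2 * pos + 1 ∨ d = 2 * pos + 2) → d < h.length → d ≠ c →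
          pvLt (pvGet h d) (pvGet h c) = false := by
        intro d hd hdlen hdc
        rw [hcdef] at hdc ⊢
        by_cases hcond : 2 * pos + 2 < h.length ∧
            pvLt (pvGet h (2 * pos + 1)) (pvGet h (2 * pos + 2)) = false
        · rw [if_pos hcond] at hdc ⊢
          have : d = 2 * pos + 1 := by omega
          subst this; exact hcond.2
        · rw [if_neg hcond] at hdc ⊢
          have hd2 : d = 2 * pos + 2 := by omega
          subst hd2
          have : pvLt (pvGet h (2 * pos + 1)) (pvGet h (2 * pos + 2)) = true := by
            rcases Bool.eq_false_or_eq_true (pvLt (pvGet h (2 * pos + 1)) (pvGet h (2 * pos + 2))) with ht | hf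
            · exact ht
            · exact absurd ⟨by omega, hf⟩ hcond
          exact pvLt_asymm this
      have key := IH (h.set pos (pvGet h c)) c item
        (by simp only [List.length_set]; omega) (by simp only [List.length_set]; omega)
        (by -- hA'
          intro i j hj hchl hic hjc
          simp only [List.length_set] at hj
          by_cases hipos : i = pos
          · subst hipos
            rw [pvGet_set_self hpos, pvGet_set_ne (by omega)]
            exact hmin j hchl hj (by omega)
          · by_cases hjpos : j = pos
            · have hip : i = (pos - 1) / 2 := by omega
              rw [hjpos, hip, pvGet_set_self hpos,
                pvGet_set_ne (show pos ≠ (pos - 1) / 2 by omega)]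
              exact hC (by omega) c hclen hcchild
            · rw [pvGet_set_ne (by omega), pvGet_set_ne (by omega)]
              exact hA i j hj hchl hipos hjpos)
        (by -- hC'
          intro _ j hj hchl
          simp only [List.length_set] at hj
          have hcp : (c - 1) / 2 = pos := by omega
          rw [hcp, pvGet_set_self hpos, pvGet_set_ne (show pos ≠ j by omega)]
          exact hA c j hj (by omega) (by omega) (by omega))
      refine ⟨key.1, ?_⟩
      rw [key.2]
      exact mset_two_set h pos c hpos hclen (by omega) item
    · rw [if_neg hch]
      have key := pvSiftdown_spec pos (h.set pos item) item (by simp [hpos])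
        (by
          intro i j hj hchl hip hjp
          simp only [List.length_set] at hj
          rw [pvGet_set_ne (by omega), pvGet_set_ne (by omega)]
          exact hA i j hj hchl hip hjp)
        (by intro j hj hchl; simp only [List.length_set] at hj; omega)
        (by intro _ j hj hchl; simp only [List.length_set] at hj; omega)
      refine ⟨key.1, ?_⟩
      rw [key.2, List.set_set]

theorem pvSiftup_spec (h : List (Int × Int)) (pos : Nat) (item : Int × Int)
    (hpos : pos < h.length)
    (hA : ∀ i j, j < h.length → (j = 2 * i + 1 ∨ j = 2 * i + 2) → i ≠ pos → j ≠ pos →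
      pvLt (pvGet h j) (pvGet h i) = false)
    (hC : 0 < pos → ∀ j, j < h.length → (j = 2 * pos + 1 ∨ j = 2 * pos + 2) →
      pvLt (pvGet h j) (pvGet h ((pos - 1) / 2)) = false) :
    HeapInv (pvSiftup h 0 pos item) ∧
      (↑(pvSiftup h 0 pos item) : Multiset (Int × Int)) = ↑(h.set pos item) :=
  pvSiftupGo_spec (h.length + 1) h pos item (by omega) hpos hA hC

theorem pvHeappush_spec (h : List (Int × Int)) (x : Int × Int) (hH : HeapInv h) :
    HeapInv (pvHeappush h x) ∧
      (↑(pvHeappush h x) : Multiset (Int × Int)) = x ::ₘ (↑h : Multiset (Int × Int)) := by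
  have hlen : h.length < (h ++ [x]).length := by simp
  have key := pvSiftdown_spec h.length (h ++ [x]) x hlen
    (by
      intro i j hj hchl hip hjp
      simp only [List.length_append, List.length_cons, List.length_nil] at hj
      have hjlt : j < h.length := by omega
      have hilt : i < h.length := by omega
      rw [pvGet_append_lt x hilt, pvGet_append_lt x hjlt]
      exact hH i j hjlt hchl)
    (by intro j hj hchl; simp at hj; omega)
    (by intro _ j hj hchl; simp at hj; omega)
  rw [pvHeappush]
  refine ⟨key.1, ?_⟩
  rw [key.2]
  rw [List.set_append]
  simp

theorem pvHeap_top (h : List (Int × Int)) (hH : HeapInv h) :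
    ∀ j, j < h.length → pvLt (pvGet h j) (pvGet h 0) = false := by
  intro j
  induction j using Nat.strong_induction_on with
  | _ j IH =>
    intro hj
    rcases Nat.eq_zero_or_pos j with h0 | h0
    · subst h0; exact pvLt_irrefl _
    · have hpar : (j - 1) / 2 < j := by omega
      have h1 : pvLt (pvGet h j) (pvGet h ((j - 1) / 2)) = false :=
        hH ((j - 1) / 2) j hj (by omega)
      exact pvLe_trans (IH _ hpar (by omega)) h1

theorem pvHeappop_spec (h : List (Int × Int)) (hh : h ≠ []) (hH : HeapInv h) :
    (pvHeappop h).1 = pvGet h 0 ∧ HeapInv (pvHeappop h).2 ∧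
      (↑h : Multiset (Int × Int)) = (pvGet h 0) ::ₘ ↑(pvHeappop h).2 := by
  have hlen : 0 < h.length := List.length_pos_iff.mpr hh
  have hsplit : h.take (h.length - 1) ++ [pvGet h (h.length - 1)] = h := by
    rw [pvGet_eq_getElem (by omega), ← List.getLast_eq_getElem hh,
      ← List.dropLast_eq_take, List.dropLast_append_getLast]
  rcases Nat.lt_or_ge 1 h.length with h2 | h1
  · -- h.length ≥ 2
    have hrl : (h.take (h.length - 1)).length = h.length - 1 := by simp
    rw [pvHeappop]
    simp only [hrl]
    rw [if_pos (by omega)]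
    set last := pvGet h (h.length - 1) with hlast
    set rest := h.take (h.length - 1) with hrest
    have key := pvSiftup_spec (rest.set 0 last) 0 last
      (by simp [hrest]; omega)
      (by
        intro i j hj hchl hi0 hj0
        simp only [List.length_set, hrest, List.length_take] at hj
        rw [pvGet_set_ne (by omega), pvGet_set_ne (by omega), hrest,
          pvGet_take (by omega), pvGet_take (by omega)]
        exact hH i j (by omega) hchl)
      (by intro h0 _ _ _; omega)
    have hr0 : pvGet rest 0 = pvGet h 0 := by rw [hrest, pvGet_take (by omega)]
    refine ⟨hr0, key.1, ?_⟩
    have hm : (pvGet rest 0) ::ₘ (↑(rest.set 0 last) : Multiset (Int × Int))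
        = last ::ₘ ↑rest := mset_set rest 0 (by rw [hrl]; omega) last
    rw [List.set_set] at key
    rw [key.2, ← hr0]
    rw [hm]
    calc (↑h : Multiset (Int × Int)) = ↑(rest ++ [last]) := by rw [hsplit]
      _ = ↑rest + ↑[last] := by rw [Multiset.coe_add]
      _ = last ::ₘ ↑rest := by
          rw [show (↑[last] : Multiset (Int × Int)) = {last} from rfl, add_comm,
            Multiset.singleton_add]
  · -- h.length = 1
    have hone : h.length = 1 := by omega
    obtain ⟨a, rfl⟩ := List.length_eq_one_iff.mp hone
    rw [pvHeappop]
    simp [pvGet, HeapInv]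

theorem pvBuild_spec : ∀ (xs : List (Int × Int)) (h : List (Int × Int)), HeapInv h →
    HeapInv (xs.foldl pvHeappush h) ∧
      (↑(xs.foldl pvHeappush h) : Multiset (Int × Int)) = ↑h + ↑xs
  | [], h, hH => ⟨hH, by simp⟩
  | x :: xs, h, hH => by
    have hp := pvHeappush_spec h x hH
    have ih := pvBuild_spec xs (pvHeappush h x) hp.1
    refine ⟨ih.1, ?_⟩
    simp only [List.foldl_cons]
    rw [ih.2, hp.2, ← Multiset.cons_coe]
    rw [Multiset.add_cons]
    rw [Multiset.cons_add]

-- B's old-style pointer walk over the sorted pairs: the PROOF-SIDE bridge between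
-- A's heap loop and B's closed threshold formula (used only below, by the lemmas)
def pvLoopB : Nat → List (Int × Int) → Nat → Int → Int → Int → Int
  | 0, _, _, _, _, _ => 0
  | fuel + 1, ys, p, sum_time, pre_time, k =>
    if p < ys.length then
      if sum_time + ((pvGet ys p).1 - pre_time) * ((ys.length : Int) - p) ≤ k then
        pvLoopB fuel ys (p + 1) (sum_time + ((pvGet ys p).1 - pre_time) * ((ys.length : Int) - p)) (pvGet ys p).1 k
      else
        let rest := PySem.List.sorted (ys.drop p) (fun x => x.2) false
        ((PySem.List.pyGet? rest (PySem.Int.mod (k - sum_time) ((ys.length : Int) - p))).getD (0, 0)).2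
    else 0

-- the strict lexicographic order on the sorted pair list
theorem fst_le_of_pvLt {a b : Int × Int} (h : pvLt a b = true) : a.1 ≤ b.1 := by
  simp [pvLt] at h; omega

theorem pvLt_of_fst_lt {a b : Int × Int} (h : a.1 < b.1) : pvLt a b = true := by
  simp [pvLt]; omega

theorem pvLt_of_fst_le_snd_lt {a b : Int × Int} (h1 : ¬ a.1 < b.1) (h2 : ¬ b.1 < a.1)
    (h3 : a.2 < b.2) : pvLt a b = true := by
  simp [pvLt]; omega

theorem insertBy_pairwise_lex (x : Int × Int) :
    ∀ (acc : List (Int × Int)), acc.Pairwise (fun a b => pvLt a b = true) →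
    (∀ y ∈ acc, y.2 < x.2) →
    (PySem.List.insertBy (fun a b => decide (a.1 < b.1)) x acc).Pairwise
      (fun a b => pvLt a b = true)
  | [], _, _ => by simp [PySem.List.insertBy]
  | y :: ys, hacc, hlt => by
    rw [PySem.List.insertBy]
    by_cases hxy : x.1 < y.1
    · rw [if_pos (by simpa using hxy)]
      refine List.Pairwise.cons ?_ hacc
      intro z hz
      rcases List.mem_cons.mp hz with rfl | hz
      · exact pvLt_of_fst_lt hxy
      · have hyz := (List.pairwise_cons.mp hacc).1 z hz
        exact pvLt_of_fst_lt (lt_of_lt_of_le hxy (fst_le_of_pvLt hyz))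
    · rw [if_neg (by simpa using hxy)]
      refine List.Pairwise.cons ?_ (insertBy_pairwise_lex x ys
        (List.pairwise_cons.mp hacc).2 (fun z hz => hlt z (by simp [hz])))
      intro z hz
      rcases (PySem.List.mem_insertBy _ _ _ _).mp hz with rfl | hz
      · by_cases hyx : y.1 < z.1
        · exact pvLt_of_fst_lt hyx
        · exact pvLt_of_fst_le_snd_lt hyx hxy (hlt y (by simp))
      · exact (List.pairwise_cons.mp hacc).1 z hz

theorem foldl_insertBy_pairwise_lex :
    ∀ (xs acc : List (Int × Int)), acc.Pairwise (fun a b => pvLt a b = true) →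
    xs.Pairwise (fun a b => a.2 < b.2) →
    (∀ y ∈ acc, ∀ x ∈ xs, y.2 < x.2) →
    (xs.foldl (fun acc x => PySem.List.insertBy (fun a b => decide (a.1 < b.1)) x acc)
      acc).Pairwise (fun a b => pvLt a b = true)
  | [], acc, hacc, _, _ => hacc
  | x :: xs, acc, hacc, hxs, hcross => by
    simp only [List.foldl_cons]
    refine foldl_insertBy_pairwise_lex xs _ (insertBy_pairwise_lex x acc hacc
      (fun y hy => hcross y hy x (by simp))) (List.pairwise_cons.mp hxs).2 ?_
    intro y hy z hz
    rcases (PySem.List.mem_insertBy _ _ _ _).mp hy with rfl | hy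
    · exact (List.pairwise_cons.mp hxs).1 z hz
    · exact hcross y hy z (by simp [hz])

-- two lists with the same multiset and duplicate-free second components have
-- the same Python sort by second component
theorem sorted_snd_eq_of_perm (q zs : List (Int × Int))
    (hperm : (↑q : Multiset (Int × Int)) = ↑zs)
    (hnd : (zs.map Prod.snd).Nodup) :
    PySem.List.sorted q (fun x => x.2) false = PySem.List.sorted zs (fun x => x.2) false := by
  set w := PySem.List.sorted zs (fun x => x.2) false with hw
  have hwperm : w.Perm zs := PySem.List.sorted_perm zs (fun x => x.2) false
  have hwnd : (w.map Prod.snd).Nodup := (hwperm.map Prod.snd).nodup_iff.mpr hnd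
  have hwle : w.Pairwise (fun a b => a.2 ≤ b.2) := PySem.List.sorted_pairwise zs (fun x => x.2)
  have hwlt : w.Pairwise (fun a b => a.2 < b.2) := by
    have hne : w.Pairwise (fun a b => a.2 ≠ b.2) := List.pairwise_map.mp hwnd
    exact (hwle.and hne).imp (fun h => lt_of_le_of_ne h.1 h.2)
  exact PySem.List.sorted_eq_of_perm_of_pairwise_lt q w (fun x => x.2)
    (hwperm.trans (Multiset.coe_eq_coe.mp hperm).symm) hwlt

-- heap top = head of the sorted remainder
theorem pvTop_eq (ys q : List (Int × Int)) (p : Nat)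
    (hys : ys.Pairwise (fun a b => pvLt a b = true))
    (hq : (↑q : Multiset (Int × Int)) = ↑(ys.drop p))
    (hH : HeapInv q) (hp : p < ys.length) : pvGet q 0 = ys[p] := by
  have hdropeq : ys.drop p = ys[p] :: ys.drop (p + 1) := List.drop_eq_getElem_cons hp
  have hqperm : q.Perm (ys.drop p) := Multiset.coe_eq_coe.mp hq
  have hqlen : 0 < q.length := by
    rw [hqperm.length_eq, List.length_drop]; omega
  have hq0mem : pvGet q 0 ∈ ys.drop p := by
    refine hqperm.mem_iff.mp ?_
    rw [pvGet_eq_getElem hqlen]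
    exact List.getElem_mem hqlen
  have hpmem : ys[p] ∈ q := by
    refine hqperm.mem_iff.mpr ?_
    rw [hdropeq]
    exact List.mem_cons_self
  have hdroppw : (ys.drop p).Pairwise (fun a b => pvLt a b = true) :=
    List.Pairwise.sublist (List.drop_sublist p ys) hys
  have d1 : pvLt ys[p] (pvGet q 0) = false := by
    obtain ⟨j, hj, hje⟩ := List.mem_iff_getElem.mp hpmem
    rw [← hje, ← pvGet_eq_getElem hj]
    exact pvHeap_top q hH j hj
  have d2 : pvLt (pvGet q 0) ys[p] = false := by
    rw [hdropeq] at hq0mem hdroppw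
    rcases List.mem_cons.mp hq0mem with h0 | h0
    · rw [h0]; exact pvLt_irrefl _
    · have := (List.pairwise_cons.mp hdroppw).1 _ h0
      exact pvLt_asymm this
  exact pvLe_antisymm d1 d2

-- the loop bisimulation: the heap walks the sorted pair list
theorem pvLoop_eq (ys : List (Int × Int))
    (hys : ys.Pairwise (fun a b => pvLt a b = true))
    (hnd : (ys.map Prod.snd).Nodup) :
    ∀ (fuel p : Nat) (q : List (Int × Int)) (s pre k : Int),
    ys.length - p < fuel →
    (↑q : Multiset (Int × Int)) = ↑(ys.drop p) →
    HeapInv q →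
    pvLoopA fuel q s pre ((ys.length : Int) - p) k = pvLoopB fuel ys p s pre k := by
  intro fuel
  induction fuel with
  | zero => intro p q s pre k hfuel; omega
  | succ fuel IH =>
    intro p q s pre k hfuel hq hH
    have hqperm : q.Perm (ys.drop p) := Multiset.coe_eq_coe.mp hq
    have hqlen : q.length = ys.length - p := by
      rw [hqperm.length_eq, List.length_drop]
    by_cases hp : p < ys.length
    · have hqne : q ≠ [] := by
        intro hnil; rw [hnil] at hqlen; simp at hqlen; omega
      have htop : pvGet q 0 = ys[p] := pvTop_eq ys q p hys hq hH hp
      have hgetp : pvGet ys p = ys[p] := pvGet_eq_getElem hp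
      simp only [pvLoopA, pvLoopB]
      rw [if_pos hqne, if_pos hp]
      rw [htop, hgetp]
      by_cases hcond : s + (ys[p].1 - pre) * ((ys.length : Int) - p) ≤ k
      · rw [if_pos hcond, if_pos hcond]
        have hpop := pvHeappop_spec q hqne hH
        have hdropeq : ys.drop p = ys[p] :: ys.drop (p + 1) := List.drop_eq_getElem_cons hp
        have hpop1 : (pvHeappop q).1 = ys[p] := by rw [hpop.1, htop]
        have hq' : (↑(pvHeappop q).2 : Multiset (Int × Int)) = ↑(ys.drop (p + 1)) := by
          have := hpop.2.2
          rw [htop, hq, hdropeq, ← Multiset.cons_coe] at this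
          exact ((Multiset.cons_inj_right _).mp this.symm)
        have := IH (p + 1) (pvHeappop q).2
          (s + ((pvHeappop q).1.1 - pre) * ((ys.length : Int) - p)) (pvHeappop q).1.1 k
          (by omega) hq' hpop.2.1
        rw [hpop1] at this ⊢
        rw [← this]
        congr 1
        push_cast
        ring
      · rw [if_neg hcond, if_neg hcond]
        have hrest : PySem.List.sorted q (fun x => x.2) false
            = PySem.List.sorted (ys.drop p) (fun x => x.2) false := by
          refine sorted_snd_eq_of_perm q (ys.drop p) hq ?_
          have : (ys.drop p).map Prod.snd = (ys.map Prod.snd).drop p := by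
            rw [List.map_drop]
          rw [this]
          exact hnd.sublist (List.drop_sublist p _)
        rw [hrest]
    · have hqnil : q = [] := by
        have hple : ys.length ≤ p := by omega
        have hpm := hqperm
        rw [List.drop_eq_nil_of_le hple] at hpm
        exact hpm.eq_nil
      simp only [pvLoopA, pvLoopB]
      simp only [hqnil, ne_eq, not_true_eq_false, if_false, if_neg (show ¬ p < ys.length by omega)]

-- ---------- proof-side abbreviations for the common lists ----------
def pvXs (ft : List Int) : List (Int × Int) :=
  (PySem.List.enumerate ft 0).map (fun p => (p.2, p.1 + 1))

def pvYs (ft : List Int) : List (Int × Int) :=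
  PySem.List.sorted (pvXs ft) (fun x => x.1) false

-- closed forms that B's full(j) computes: G j = time to eat everything down to level vals[j]
def pvG (vals : List Int) (j : Nat) : Int :=
  (vals.take (j + 1)).sum + vals.getD j 0 * ((vals.length : Int) - 1 - (j : Int))

-- A-loop state at pointer p: accumulated time / previous level
def pvS (vals : List Int) (p : Nat) : Int := if p = 0 then 0 else pvG vals (p - 1)
def pvP (vals : List Int) (p : Nat) : Int := if p = 0 then 0 else vals.getD (p - 1) 0

theorem pvXs_length (ft : List Int) : (pvXs ft).length = ft.length := by
  rw [pvXs, List.length_map, PySem.List.length_enumerate]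

theorem pvXs_snd_lt (ft : List Int) : (pvXs ft).Pairwise (fun a b => a.2 < b.2) := by
  rw [pvXs, List.pairwise_map]
  exact (PySem.List.pairwise_lt_enumerate ft 0).imp (fun h => by simpa using h)

theorem pvYs_perm (ft : List Int) : (pvYs ft).Perm (pvXs ft) :=
  PySem.List.sorted_perm _ _ _

theorem pvYs_lex (ft : List Int) :
    (pvYs ft).Pairwise (fun a b => pvLt a b = true) := by
  rw [pvYs, PySem.List.sorted_eq_foldl_insertBy]
  exact foldl_insertBy_pairwise_lex (pvXs ft) [] (by simp) (pvXs_snd_lt ft) (by simp)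

theorem pvYs_snd_nodup (ft : List Int) : ((pvYs ft).map Prod.snd).Nodup := by
  refine ((pvYs_perm ft).map Prod.snd).nodup_iff.mpr ?_
  exact List.pairwise_map.mpr ((pvXs_snd_lt ft).imp (fun h => ne_of_lt h))

theorem pvXs_map_fst (ft : List Int) : (pvXs ft).map Prod.fst = ft := by
  rw [pvXs, List.map_map]
  exact PySem.List.map_snd_enumerate ft 0

theorem pvYs_length (ft : List Int) : (pvYs ft).length = ft.length := by
  rw [pvYs, PySem.List.length_sorted, pvXs, List.length_map, PySem.List.length_enumerate]

-- the fst-projection of the lex-sorted pairs IS Python's sorted(food_times)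
theorem pvYs_map_fst (ft : List Int) :
    (pvYs ft).map Prod.fst = PySem.List.sorted ft (fun x => x) false := by
  have h1 : ((pvYs ft).map Prod.fst).Pairwise (· ≤ ·) := by
    rw [List.pairwise_map]
    exact (pvYs_lex ft).imp (fun h => fst_le_of_pvLt h)
  have h2 : (PySem.List.sorted ft (fun x => x) false).Pairwise (· ≤ ·) :=
    PySem.List.sorted_pairwise ft (fun x => x)
  have hperm : ((pvYs ft).map Prod.fst).Perm (PySem.List.sorted ft (fun x => x) false) := by
    refine ((pvYs_perm ft).map Prod.fst).trans ?_
    rw [pvXs_map_fst]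
    exact (PySem.List.sorted_perm ft (fun x => x) false).symm
  exact List.Perm.eq_of_pairwise' h1 h2 hperm

-- ---------- step identities for the closed form ----------
theorem pvG_step (vals : List Int) (p : Nat) (hp : p < vals.length) :
    pvS vals p + (vals.getD p 0 - pvP vals p) * ((vals.length : Int) - (p : Int)) = pvG vals p := by
  cases p with
  | zero =>
    simp only [pvS, pvP, pvG]
    rw [List.sum_take_succ vals 0 hp, List.getD_eq_getElem vals 0 hp]
    simp only [List.take_zero, List.sum_nil]
    push_cast
    ring
  | succ q =>
    simp only [pvS, pvP, pvG, if_neg (Nat.succ_ne_zero q), Nat.add_sub_cancel]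
    rw [List.sum_take_succ vals (q + 1) hp,
      List.getD_eq_getElem vals 0 hp, List.getD_eq_getElem vals 0 (by omega)]
    push_cast
    ring

theorem pvG_succ_diff (vals : List Int) (b : Nat) (hb : b + 1 < vals.length) :
    pvG vals (b + 1) = pvG vals b
      + (vals.getD (b + 1) 0 - vals.getD b 0) * ((vals.length : Int) - (b : Int) - 1) := by
  simp only [pvG]
  rw [List.sum_take_succ vals (b + 1) hb,
    List.getD_eq_getElem vals 0 hb, List.getD_eq_getElem vals 0 (by omega)]
  push_cast
  ring

theorem pvG_mono (vals : List Int) (hle : vals.Pairwise (· ≤ ·)) :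
    ∀ b, b < vals.length → ∀ a, a ≤ b → pvG vals a ≤ pvG vals b := by
  intro b
  induction b with
  | zero => intro _ a ha; interval_cases a; exact le_refl _
  | succ b IH =>
    intro hb a ha
    rcases Nat.eq_or_lt_of_le ha with rfl | hlt
    · exact le_refl _
    · have h1 : pvG vals a ≤ pvG vals b := IH (by omega) a (by omega)
      refine le_trans h1 ?_
      rw [pvG_succ_diff vals b hb]
      have hv : vals.getD b 0 ≤ vals.getD (b + 1) 0 := by
        rw [List.getD_eq_getElem vals 0 (by omega), List.getD_eq_getElem vals 0 hb]
        exact List.pairwise_iff_getElem.mp hle b (b + 1) (by omega) hb (by omega)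
      have hpos : (0 : Int) ≤ (vals.length : Int) - (b : Int) - 1 := by
        have : (b : Int) + 1 < (vals.length : Int) := by exact_mod_cast hb
        omega
      nlinarith

theorem pvG_last (vals : List Int) (hne : vals ≠ []) :
    pvG vals (vals.length - 1) = vals.sum := by
  have hlen : 0 < vals.length := List.length_pos_iff.mpr hne
  simp only [pvG]
  rw [Nat.sub_add_cancel hlen, List.take_length]
  have : ((vals.length : Int) - 1 - ((vals.length - 1 : Nat) : Int)) = 0 := by
    push_cast [Nat.cast_sub hlen]
    ring
  rw [this, mul_zero, add_zero]

-- ---------- the pointer loop computes the threshold formula ----------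
theorem pvLoopB_char (ys : List (Int × Int)) (k : Int) :
    ∀ (fuel p lo : Nat), ys.length - p < fuel → p ≤ lo → lo < ys.length →
    (∀ j, j < lo → pvG (ys.map Prod.fst) j ≤ k) →
    ¬ pvG (ys.map Prod.fst) lo ≤ k →
    pvLoopB fuel ys p (pvS (ys.map Prod.fst) p) (pvP (ys.map Prod.fst) p) k =
      ((PySem.List.pyGet? (PySem.List.sorted (ys.drop lo) (fun x => x.2) false)
        (PySem.Int.mod (k - pvS (ys.map Prod.fst) lo) ((ys.length : Int) - (lo : Int)))).getD (0, 0)).2 := by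
  intro fuel
  induction fuel with
  | zero => intro p lo hfuel; omega
  | succ fuel IH =>
    intro p lo hfuel hple hlo hlo1 hlo2
    set vals := ys.map Prod.fst with hvals
    have hp : p < ys.length := by omega
    have hvlen : vals.length = ys.length := by rw [hvals, List.length_map]
    have hget : (pvGet ys p).1 = vals.getD p 0 := by
      rw [pvGet_eq_getElem hp, hvals,
        List.getD_eq_getElem (List.map Prod.fst ys) 0 (by simpa using hp), List.getElem_map]
    have hcondval : pvS vals p + ((pvGet ys p).1 - pvP vals p) * ((ys.length : Int) - (p : Int))
        = pvG vals p := by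
      rw [hget, ← hvlen]
      exact pvG_step vals p (by omega)
    simp only [pvLoopB]
    rw [if_pos hp]
    rcases Nat.eq_or_lt_of_le hple with rfl | hplt
    · -- p = lo: the loop stops here
      rw [if_neg (by rw [hcondval]; exact hlo2)]
    · -- p < lo: the loop continues
      rw [if_pos (by rw [hcondval]; exact hlo1 p hplt)]
      have hs' : pvS vals p + ((pvGet ys p).1 - pvP vals p) * ((ys.length : Int) - (p : Int))
          = pvS vals (p + 1) := by
        rw [hcondval, pvS, if_neg (Nat.succ_ne_zero p), Nat.add_sub_cancel]
      have hpre' : (pvGet ys p).1 = pvP vals (p + 1) := by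
        rw [hget, pvP, if_neg (Nat.succ_ne_zero p), Nat.add_sub_cancel]
      rw [hs', hpre']
      exact IH (p + 1) lo (by omega) (by omega) hlo (fun j hj => hlo1 j hj) hlo2

-- ---------- B's prefix-sum list ----------
theorem pvPrefix_fold : ∀ (vs acc : List Int) (s : Int),
    List.foldl (fun a v => a ++ [PySem.List.pyGetD a (-1) 0 + v]) (acc ++ [s]) vs
    = acc ++ (List.range (vs.length + 1)).map (fun t => s + (vs.take t).sum) := by
  intro vs
  induction vs with
  | nil => intro acc s; simp [List.range_succ]
  | cons v vs IH =>
    intro acc s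
    simp only [List.foldl_cons]
    rw [PySem.List.pyGetD_neg_one_append_singleton]
    rw [IH (acc ++ [s]) (s + v)]
    have hmap : (List.range ((v :: vs).length + 1)).map (fun t => s + ((v :: vs).take t).sum)
        = s :: (List.range (vs.length + 1)).map (fun t => (s + v) + (vs.take t).sum) := by
      rw [List.length_cons, List.range_succ_eq_map, List.map_cons, List.map_map]
      refine congrArg₂ List.cons (by simp) ?_
      refine List.map_congr_left ?_
      intro t _
      simp [List.take_succ_cons, add_assoc]
    rw [hmap]
    simp

theorem pvPrefix_eq (vs : List Int) :
    vs.foldl (fun acc v => acc ++ [PySem.List.pyGetD acc (-1) 0 + v]) [0]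
    = (List.range (vs.length + 1)).map (fun t => (vs.take t).sum) := by
  have := pvPrefix_fold vs [] 0
  simpa using this

-- B's full(j) equals the closed form G at index j
theorem pvFullAt_eq (vals : List Int) (m : Nat) (hj : m < vals.length) :
    pvFullAt ((List.range (vals.length + 1)).map (fun t => (vals.take t).sum)) vals
      (vals.length : Int) (m : Int) = pvG vals m := by
  rw [pvFullAt, pvG]
  rw [show ((m : Int) + 1) = (((m + 1 : Nat)) : Int) by push_cast; ring]
  rw [PySem.List.pyGetD_natCast, PySem.List.pyGetD_natCast]
  rw [List.getD_eq_getElem _ 0 (by simpa using Nat.succ_lt_succ hj), List.getElem_map,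
    List.getElem_range]

-- ---------- Source B's binary search finds the threshold ----------
theorem pvBS_spec (prefix_ vals : List Int) (nI k : Int) :
    ∀ (fuel : Nat) (lo hi : Int), 0 ≤ lo → lo ≤ hi → hi ≤ nI → (hi - lo).toNat < fuel →
    (∀ j : Int, 0 ≤ j → j < lo → pvFullAt prefix_ vals nI j ≤ k) →
    (∀ j : Int, hi ≤ j → j < nI → ¬ pvFullAt prefix_ vals nI j ≤ k) →
    (∀ i j : Int, 0 ≤ i → i ≤ j → j < nI → pvFullAt prefix_ vals nI j ≤ k →
      pvFullAt prefix_ vals nI i ≤ k) →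
    0 ≤ pvBS fuel prefix_ vals nI k lo hi ∧ pvBS fuel prefix_ vals nI k lo hi ≤ nI ∧
    (∀ j : Int, 0 ≤ j → j < pvBS fuel prefix_ vals nI k lo hi → pvFullAt prefix_ vals nI j ≤ k) ∧
    (∀ j : Int, pvBS fuel prefix_ vals nI k lo hi ≤ j → j < nI →
      ¬ pvFullAt prefix_ vals nI j ≤ k) := by
  intro fuel
  induction fuel with
  | zero => intro lo hi h0 hlh hhn hfuel; omega
  | succ fuel IH =>
    intro lo hi h0 hlh hhn hfuel hbelow habove hmono
    simp only [pvBS]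
    by_cases hlt : lo < hi
    · rw [if_pos hlt]
      set mid := PySem.Int.floordiv (lo + hi) 2 with hmid
      have hmb := PySem.Int.floordiv_two_mid_bounds (le_of_lt hlt)
      have hmhi : mid < hi := by
        rw [hmid, PySem.Int.floordiv_lt_iff_lt_mul (by omega)]
        omega
      by_cases hPm : pvFullAt prefix_ vals nI mid ≤ k
      · rw [if_pos hPm]
        refine IH (mid + 1) hi (by omega) (by omega) hhn (by omega) ?_ habove hmono
        intro j hj0 hjm
        rcases lt_or_ge j lo with hjlo | hjlo
        · exact hbelow j hj0 hjlo
        · exact hmono j mid hj0 (by omega) (by omega) hPm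
      · rw [if_neg hPm]
        refine IH lo mid h0 (by omega) (by omega) (by omega) hbelow ?_ hmono
        intro j hjm hjn hPj
        exact hPm (hmono mid j (by omega) hjm hjn hPj)
    · rw [if_neg hlt]
      have : lo = hi := by omega
      subst this
      exact ⟨h0, hhn, fun j hj0 hjlo => hbelow j hj0 hjlo, fun j hjlo hjn => habove j hjlo hjn⟩

-- pyGet? commutes with map (used to project the pair list to its indices)
theorem pvPyGet?_map {α β : Type} (f : α → β) (L : List α) (i : Int) :
    PySem.List.pyGet? (L.map f) i = (PySem.List.pyGet? L i).map f := by
  simp only [PySem.List.pyGet?, PySem.List.pyIdx?, List.length_map]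
  split <;> (try split) <;> simp [List.getElem?_map]

-- a list whose prefix fails and whose suffix passes a predicate filters to its suffix
theorem pvFilter_eq_drop {α : Type} (p : α → Bool) :
    ∀ (l : List α) (m : Nat), m ≤ l.length →
    (∀ i (h : i < l.length), i < m → p l[i] = false) →
    (∀ i (h : i < l.length), m ≤ i → p l[i] = true) →
    l.filter p = l.drop m := by
  intro l m hm hpre hpost
  conv_lhs => rw [← List.take_append_drop m l]
  rw [List.filter_append]
  have h1 : (l.take m).filter p = [] := by
    rw [List.filter_eq_nil_iff]
    intro a ha
    obtain ⟨i, hi, hie⟩ := List.mem_iff_getElem.mp ha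
    have hil : i < l.length := by
      have := hi; simp [List.length_take] at this; omega
    rw [List.getElem_take] at hie
    rw [← hie]
    have him : i < m := by have := hi; simp [List.length_take] at this; omega
    simp [hpre i hil him]
  have h2 : (l.drop m).filter p = l.drop m := by
    rw [List.filter_eq_self]
    intro a ha
    obtain ⟨i, hi, hie⟩ := List.mem_iff_getElem.mp ha
    rw [List.getElem_drop] at hie
    rw [← hie]
    exact hpost (m + i) (by simp at hi; omega) (by omega)
  rw [h1, h2, List.nil_append]

-- A = the pointer loop (extracted from the heap bisimulation)
theorem solution_eq_loop (ft : List Int) (k : Int) (hs : ¬ ft.sum ≤ k) :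
    solution ft k = pvLoopB ((pvYs ft).length + 1) (pvYs ft) 0 0 0 k := by
  unfold solution
  rw [if_neg hs]
  simp only []
  have hfold : (PySem.List.pyRange 0 (ft.length : Int) 1).foldl
      (fun q i => pvHeappush q (PySem.List.pyGetD ft i 0, i + 1)) []
      = ((PySem.List.pyRange 0 (ft.length : Int) 1).map
          (fun i => (PySem.List.pyGetD ft i 0, i + 1))).foldl pvHeappush [] := by
    rw [List.foldl_map]
  have hpairs : pvXs ft = (PySem.List.pyRange 0 (ft.length : Int) 1).map
      (fun i => (PySem.List.pyGetD ft i 0, i + 1)) := by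
    rw [pvXs, show PySem.List.enumerate ft 0 = PySem.List.enumerate ft from rfl,
      PySem.List.enumerate_eq_map_pyRange ft 0, List.map_map, PySem.List.len_eq]
    rfl
  have hbuild := pvBuild_spec (pvXs ft) [] (by intro i j hj hch; simp at hj)
  have hmq : (↑((pvXs ft).foldl pvHeappush []) : Multiset (Int × Int)) = ↑((pvYs ft).drop 0) := by
    rw [List.drop_zero, hbuild.2]
    rw [Multiset.coe_eq_coe.mpr (pvYs_perm ft)]
    simp
  have hqlen : ((pvXs ft).foldl pvHeappush []).length = (pvYs ft).length := by
    have := congrArg Multiset.card hmq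
    simpa using this
  have := pvLoop_eq (pvYs ft) (pvYs_lex ft) (pvYs_snd_nodup ft) ((pvYs ft).length + 1) 0
    ((pvXs ft).foldl pvHeappush []) 0 0 k (by omega) hmq hbuild.1
  rw [hfold, ← hpairs, hqlen]
  rw [show ((pvYs ft).length : Int) - ((0 : Nat) : Int) = ((pvYs ft).length : Int) by simp] at this
  rw [show (ft.length : Int) = ((pvYs ft).length : Int) by rw [pvYs_length]]
  exact this

-- ===== VERDICT =====
theorem solution_spec : Claim_equal_solution := by
  intro ft k _dom pre
  unfold Spec_solution
  by_cases hs : ft.sum ≤ k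
  · unfold solution solution_alt
    rw [if_pos hs, if_pos hs]
  · have hne : ft ≠ [] := by
      intro h
      apply hs
      subst h
      simpa using pre rfl
    have hn0 : 0 < ft.length := List.length_pos_iff.mpr hne
    rw [solution_eq_loop ft k hs]
    unfold solution_alt
    rw [if_neg hs]
    simp only []
    set vals := PySem.List.sorted ft (fun x => x) false with hvalsdef
    have hvlen : vals.length = ft.length := by rw [hvalsdef, PySem.List.length_sorted]
    have hvperm : vals.Perm ft := PySem.List.sorted_perm ft (fun x => x) false
    have hvle : vals.Pairwise (· ≤ ·) := PySem.List.sorted_pairwise ft (fun x => x)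
    have hmapfst : (pvYs ft).map Prod.fst = vals := pvYs_map_fst ft
    have hsum : vals.sum = ft.sum := hvperm.sum_eq
    have hvne : vals ≠ [] := by
      intro h
      rw [h] at hvlen
      simp at hvlen
      omega
    set prefix_ := vals.foldl (fun acc v => acc ++ [PySem.List.pyGetD acc (-1) 0 + v]) [0] with hpredef
    have hprefix : prefix_ = (List.range (vals.length + 1)).map (fun t => (vals.take t).sum) :=
      pvPrefix_eq vals
    have hfull : ∀ m : Nat, m < ft.length →
        pvFullAt prefix_ vals (ft.length : Int) (m : Int) = pvG vals m := by
      intro m hm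
      rw [hprefix, show ((ft.length : Int)) = ((vals.length : Int)) by rw [hvlen]]
      exact pvFullAt_eq vals m (by omega)
    have hmono : ∀ i j : Int, 0 ≤ i → i ≤ j → j < (ft.length : Int) →
        pvFullAt prefix_ vals (ft.length : Int) j ≤ k →
        pvFullAt prefix_ vals (ft.length : Int) i ≤ k := by
      intro i j hi hij hjn hPj
      obtain ⟨mi, rfl⟩ : ∃ m : Nat, i = (m : Int) := ⟨i.toNat, by omega⟩
      obtain ⟨mj, rfl⟩ : ∃ m : Nat, j = (m : Int) := ⟨j.toNat, by omega⟩
      rw [hfull mi (by omega)]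
      rw [hfull mj (by omega)] at hPj
      exact le_trans (pvG_mono vals hvle mj (by omega) mi (by omega)) hPj
    have hbs := pvBS_spec prefix_ vals (ft.length : Int) k (vals.length + 1) 0 (ft.length : Int)
      le_rfl (by omega) le_rfl (by omega)
      (by intro j hj0 hjlt; exact absurd hj0 (by omega))
      (by intro j hj hjn; exact absurd hj (by omega))
      hmono
    obtain ⟨hr0, hrn, hrP, hrQ⟩ := hbs
    set r := pvBS (vals.length + 1) prefix_ vals (ft.length : Int) k 0 (ft.length : Int) with hrdef
    have hrlt : r < (ft.length : Int) := by
      rcases lt_or_ge r (ft.length : Int) with h | h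
      · exact h
      · exfalso
        have hc1 : ((ft.length - 1 : Nat) : Int) = (ft.length : Int) - 1 := by omega
        have hPlast := hrP ((ft.length : Int) - 1) (by omega) (by omega)
        rw [← hc1, hfull (ft.length - 1) (by omega)] at hPlast
        have hlast : pvG vals (ft.length - 1) = ft.sum := by
          rw [← hvlen, pvG_last vals hvne, hsum]
        rw [hlast] at hPlast
        exact hs hPlast
    set loN := r.toNat with hloNdef
    have hcast : (loN : Int) = r := by omega
    have hloNlt : loN < ft.length := by omega
    have hlo1 : ∀ j, j < loN → pvG vals j ≤ k := by
      intro j hj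
      have := hrP (j : Int) (by omega) (by omega)
      rwa [hfull j (by omega)] at this
    have hlo2 : ¬ pvG vals loN ≤ k := by
      have := hrQ (loN : Int) (by omega) (by omega)
      rwa [hfull loN hloNlt] at this
    have hyslen : (pvYs ft).length = ft.length := pvYs_length ft
    have h0S : pvS ((pvYs ft).map Prod.fst) 0 = 0 := by simp [pvS]
    have h0P : pvP ((pvYs ft).map Prod.fst) 0 = 0 := by simp [pvP]
    have hchar := pvLoopB_char (pvYs ft) k ((pvYs ft).length + 1) 0 loN (by omega)
      (Nat.zero_le _) (by omega) (by rw [hmapfst]; exact hlo1) (by rw [hmapfst]; exact hlo2)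
    rw [h0S, h0P] at hchar
    rw [hchar, hmapfst]
    by_cases hr00 : r = 0
    · -- nothing is ever eaten: the survivors are 1..n in order
      rw [if_pos hr00]
      simp only []
      have hlo0 : loN = 0 := by omega
      rw [hlo0]
      have hsortxs : PySem.List.sorted ((pvYs ft).drop 0) (fun x => x.2) false = pvXs ft := by
        rw [List.drop_zero]
        exact PySem.List.sorted_eq_of_perm_of_pairwise_lt _ _ _ (pvYs_perm ft).symm (pvXs_snd_lt ft)
      rw [hsortxs]
      have hS0 : pvS vals 0 = 0 := by simp [pvS]
      rw [hS0, sub_zero]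
      simp only [Nat.cast_zero, sub_zero]
      have hrange_len : ((PySem.List.pyRange 1 ((ft.length : Int) + 1) 1).length : Int)
          = (ft.length : Int) := by
        rw [PySem.List.length_pyRange_one]
        omega
      rw [hrange_len, hyslen]
      set m := PySem.Int.mod k (ft.length : Int) with hmdef
      have hm0 : 0 ≤ m := PySem.Int.mod_nonneg k (by exact_mod_cast hn0)
      have hmlt : m < (ft.length : Int) := PySem.Int.mod_lt k (by exact_mod_cast hn0)
      rw [PySem.List.pyGet?_eq_some_getElem (pvXs ft) hm0 (by rw [pvXs_length]; exact_mod_cast hmlt),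
        PySem.List.pyGet?_eq_some_getElem _ hm0 (by rw [PySem.List.length_pyRange_one]; omega)]
      simp only [Option.getD_some]
      simp only [pvXs, List.getElem_map, PySem.List.getElem_enumerate,
        PySem.List.getElem_pyRange_one]
      omega
    · -- the eaten levels are vals[0..loN), the survivors those above vals[loN-1]
      rw [if_neg hr00]
      simp only []
      have hge1 : 1 ≤ loN := by omega
      have hTidx : r - 1 = ((loN - 1 : Nat) : Int) := by omega
      have hTval : PySem.List.pyGetD vals (r - 1) 0 = vals.getD (loN - 1) 0 := by
        rw [hTidx, PySem.List.pyGetD_natCast]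
      have hSval : pvFullAt prefix_ vals (ft.length : Int) (r - 1) = pvS vals loN := by
        rw [hTidx, hfull (loN - 1) (by omega), pvS, if_neg (by omega)]
      have hvgetle : ∀ i j, i ≤ j → j < vals.length → vals.getD i 0 ≤ vals.getD j 0 := by
        intro i j hij hj
        rcases Nat.eq_or_lt_of_le hij with rfl | hlt
        · exact le_refl _
        · rw [List.getD_eq_getElem vals 0 (by omega), List.getD_eq_getElem vals 0 hj]
          exact List.pairwise_iff_getElem.mp hvle i j (by omega) hj hlt
      have hGd := pvG_succ_diff vals (loN - 1) (by omega)
      rw [Nat.sub_add_cancel hge1] at hGd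
      have hTlt : vals.getD (loN - 1) 0 < vals.getD loN 0 := by
        by_contra hle2
        rw [not_lt] at hle2
        have heq : vals.getD loN 0 = vals.getD (loN - 1) 0 :=
          le_antisymm hle2 (hvgetle (loN - 1) loN (by omega) (by omega))
        rw [heq] at hGd
        simp at hGd
        exact hlo2 (hGd ▸ hlo1 (loN - 1) (by omega))
      have hysfst : ∀ i (h : i < (pvYs ft).length), (pvYs ft)[i].1 = vals.getD i 0 := by
        intro i h
        have h2 : i < vals.length := by omega
        have h3 : i < (List.map Prod.fst (pvYs ft)).length := by simpa using h
        calc (pvYs ft)[i].1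
            = (List.map Prod.fst (pvYs ft))[i]'h3 := (List.getElem_map _).symm
          _ = vals[i]'h2 := List.getElem_of_eq hmapfst h3
          _ = vals.getD i 0 := (List.getD_eq_getElem vals 0 h2).symm
      have hdropfilter : (pvYs ft).filter (fun q => decide (vals.getD (loN - 1) 0 < q.1))
          = (pvYs ft).drop loN := by
        apply pvFilter_eq_drop _ _ loN (by omega)
        · intro i h hi
          have hle3 : (pvYs ft)[i].1 ≤ vals.getD (loN - 1) 0 := by
            rw [hysfst i h]
            exact hvgetle i (loN - 1) (by omega) (by omega)
          exact decide_eq_false (not_lt.mpr hle3)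
        · intro i h hi
          have hlt3 : vals.getD (loN - 1) 0 < (pvYs ft)[i].1 := by
            rw [hysfst i h]
            exact lt_of_lt_of_le hTlt (hvgetle loN i hi (by omega))
          exact decide_eq_true hlt3
      have hsortdrop : PySem.List.sorted ((pvYs ft).drop loN) (fun x => x.2) false
          = (pvXs ft).filter (fun q => decide (vals.getD (loN - 1) 0 < q.1)) := by
        rw [← hdropfilter]
        exact PySem.List.sorted_eq_of_perm_of_pairwise_lt _ _ _
          ((pvYs_perm ft).filter _).symm
          (List.Pairwise.sublist (List.filter_sublist) (pvXs_snd_lt ft))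
      have hfiltermap : (pvXs ft).filter (fun q => decide (vals.getD (loN - 1) 0 < q.1))
          = ((PySem.List.enumerate ft 0).filter
              (fun p => decide (vals.getD (loN - 1) 0 < p.2))).map (fun p => (p.2, p.1 + 1)) := by
        rw [pvXs, List.filter_map]
        rfl
      rw [hTval, hSval, hsortdrop, hfiltermap]
      set L := (PySem.List.enumerate ft 0).filter
        (fun p => decide (vals.getD (loN - 1) 0 < p.2)) with hLdef
      have hLlen : L.length = ft.length - loN := by
        have h1 : (L.map (fun p : Int × Int => (p.2, p.1 + 1))).length
            = ((pvYs ft).drop loN).length := by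
          rw [← hfiltermap, ← hsortdrop, PySem.List.length_sorted]
        rw [List.length_map] at h1
        rw [h1, List.length_drop, hyslen]
      have hidx : ((pvYs ft).length : Int) - (loN : Int)
          = (((L.map (fun p : Int × Int => p.1 + 1)).length : Nat) : Int) := by
        rw [List.length_map, hLlen, hyslen]
        omega
      rw [hidx, pvPyGet?_map, pvPyGet?_map]
      cases PySem.List.pyGet? L (PySem.Int.mod (k - pvS vals loN)
        (((L.map (fun p : Int × Int => p.1 + 1)).length : Nat) : Int)) <;> simp
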